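-- pv_equiv track=rewrite | github.com/anhlt/scala-runner | scala_runner/workspace_manager.py | _is_valid_branch_name
-- ===== SOURCE A (Python) =====
-- def _is_valid_branch_name(branch_name: str) -> bool:
--     """Validate Git branch name"""
--     if not branch_name or len(branch_name) > 100:
--         return False
--
--     # Git branch name restrictions
--     invalid_chars = ['~', '^', ':', '?', '*', '[', '\\', ' ', '\t', '\n']
--     if any(char in branch_name for char in invalid_chars):
--         return False
--
--     # Cannot start/end with slash or dot
--     if branch_name.startswith('/') or branch_name.endswith('/'):
--         return False
--     if branch_name.startswith('.') or branch_name.endswith('.'):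
--         return False
--
--     # Cannot contain consecutive dots or slashes
--     if '..' in branch_name or '//' in branch_name:
--         return False
--
--     return True
-- ===== SOURCE B (Python) =====
-- def _is_valid_branch_name(branch_name: str) -> bool:
--     if not branch_name or len(branch_name) > 100:
--         return False
--     if branch_name[0] in './' or branch_name[-1] in './':
--         return False
--     prev = None
--     for ch in branch_name:
--         if ch in '~^:?*[\\ \t\n':
--             return False
--         if (ch == '.' and prev == '.') or (ch == '/' and prev == '/'):
--             return False
--         prev = ch
--     return True
-- ===== Notes on version B (the rewrite author's own statement) =====
-- stated objective: alternative
-- what changed: A runs several independent substring/membership/startswith passes over the name; B does one stateful left-to-right scan tracking the previous character (catching invalid characters and consecutive '..'/'//' in the same pass) plus direct first/last-character checks.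
import Mathlib
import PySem

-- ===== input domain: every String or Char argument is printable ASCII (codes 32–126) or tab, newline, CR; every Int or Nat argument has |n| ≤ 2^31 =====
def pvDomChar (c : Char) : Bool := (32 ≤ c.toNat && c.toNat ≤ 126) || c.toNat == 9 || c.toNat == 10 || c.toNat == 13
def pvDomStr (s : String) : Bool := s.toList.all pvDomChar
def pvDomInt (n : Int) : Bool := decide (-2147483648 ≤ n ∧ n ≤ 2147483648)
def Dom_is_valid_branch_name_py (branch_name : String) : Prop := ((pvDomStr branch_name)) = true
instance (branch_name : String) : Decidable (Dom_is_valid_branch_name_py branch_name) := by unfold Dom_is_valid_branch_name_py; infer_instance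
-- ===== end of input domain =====

-- B replaces A's several independent membership/substring/startswith passes by one stateful
-- left-to-right scan tracking the previous character (plus direct first/last checks); alternative decomposition.

-- ===== PORT A =====
-- invalid_chars = ['~', '^', ':', '?', '*', '[', '\\', ' ', '\t', '\n']
def pvInvalidChars : List Char := ['~', '^', ':', '?', '*', '[', '\\', ' ', '\t', '\n']

def is_valid_branch_name_py (branch_name : String) : Bool :=
  let s := branch_name.toList
  if s.isEmpty || PySem.Chars.len s > 100 then false
  else if pvInvalidChars.any (fun c => PySem.Chars.isIn [c] s) then false
  else if PySem.Chars.startswith s ['/'] || PySem.Chars.endswith s ['/'] then false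
  else if PySem.Chars.startswith s ['.'] || PySem.Chars.endswith s ['.'] then false
  else if PySem.Chars.isIn ['.', '.'] s || PySem.Chars.isIn ['/', '/'] s then false
  else true

-- ===== PORT B =====
-- the string literal '~^:?*[\\ \t\n' of Source B
def pvBadChars : List Char := ['~', '^', ':', '?', '*', '[', '\\', ' ', '\t', '\n']

-- the for-loop of Source B: previous character as Option Char (None initially)
def pvScan : List Char → Option Char → Bool
  | [], _ => true
  | c :: rest, prev =>
    if pvBadChars.contains c then false
    else if (c == '.' && prev == some '.') || (c == '/' && prev == some '/') then false
    else pvScan rest (some c)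

def is_valid_branch_name_py_alt (branch_name : String) : Bool :=
  let s := branch_name.toList
  if s.isEmpty || PySem.Chars.len s > 100 then false
  else if (PySem.Chars.pyGet? s 0 == some '.' || PySem.Chars.pyGet? s 0 == some '/') ||
          (PySem.Chars.pyGet? s (-1) == some '.' || PySem.Chars.pyGet? s (-1) == some '/') then false
  else pvScan s none

-- ===== PRECONDITION & SPEC =====
def Spec_is_valid_branch_name_py (branch_name : String) (out : Bool) : Prop := out = is_valid_branch_name_py_alt branch_name
instance (branch_name : String) (out : Bool) : Decidable (Spec_is_valid_branch_name_py branch_name out) := by unfold Spec_is_valid_branch_name_py; infer_instance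

-- ===== CLAIM (what is proved, stated in full; the proofs are below) =====
def Claim_equal_is_valid_branch_name_py : Prop := ∀ (branch_name : String), Dom_is_valid_branch_name_py branch_name → Spec_is_valid_branch_name_py branch_name (is_valid_branch_name_py branch_name)

-- ===== LEMMAS AND PROOFS =====

-- adjacency checker: true iff the list has no consecutive ".." or "//"
def pvNoAdj : List Char → Bool
  | a :: b :: r => !((a == '.' && b == '.') || (a == '/' && b == '/')) && pvNoAdj (b :: r)
  | _ => true

lemma pvScan_some (l : List Char) : ∀ p : Char,
    pvScan l (some p) = (l.all (fun c => !pvBadChars.contains c) && pvNoAdj (p :: l)) := by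
  induction l with
  | nil => intro p; simp [pvScan, pvNoAdj]
  | cons c rest ih =>
    intro p
    simp only [pvScan, pvNoAdj, List.all_cons, ih c]
    by_cases h1 : pvBadChars.contains c = true
    · simp_all
    · cases hc1 : (c == '.') <;> cases hp1 : (p == '.') <;> cases hc2 : (c == '/') <;>
        cases hp2 : (p == '/') <;> simp_all [beq_iff_eq]

lemma pvScan_none (l : List Char) :
    pvScan l none = (l.all (fun c => !pvBadChars.contains c) && pvNoAdj l) := by
  cases l with
  | nil => simp [pvScan, pvNoAdj]
  | cons c rest =>
    simp only [pvScan, List.all_cons, pvScan_some rest c]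
    by_cases h1 : pvBadChars.contains c = true <;> simp_all

lemma pvNoAdj_false_iff (l : List Char) :
    pvNoAdj l = false ↔ (['.', '.'] <:+: l ∨ ['/', '/'] <:+: l) := by
  induction l with
  | nil => simp [pvNoAdj]
  | cons a t ih =>
    cases t with
    | nil => simp [pvNoAdj, List.infix_cons_iff, List.cons_prefix_cons]
    | cons b r =>
      simp only [pvNoAdj, List.infix_cons_iff, List.cons_prefix_cons, List.nil_prefix,
        and_true] at ih ⊢
      by_cases h1 : a = '.' <;> by_cases h2 : b = '.' <;> by_cases h3 : a = '/' <;>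
        by_cases h4 : b = '/' <;> simp_all <;> tauto

lemma pvNoAdj_true_iff (l : List Char) :
    pvNoAdj l = true ↔ ¬ ['.', '.'] <:+: l ∧ ¬ ['/', '/'] <:+: l := by
  have h := pvNoAdj_false_iff l
  cases hb : pvNoAdj l <;> simp_all
  tauto

lemma pvSingleton_infix_iff (c : Char) (l : List Char) : [c] <:+: l ↔ c ∈ l := by
  constructor
  · intro h; exact h.mem (by simp)
  · intro h
    obtain ⟨s, t, rfl⟩ := List.append_of_mem h
    exact ⟨s, t, by simp⟩

lemma pvSingleton_prefix_iff (c : Char) (l : List Char) : [c] <+: l ↔ l.head? = some c := by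
  cases l with
  | nil => simp
  | cons a t => simp [List.cons_prefix_cons, eq_comm]

lemma pvStartswith_iff (l : List Char) (c : Char) :
    PySem.Chars.startswith l [c] = true ↔ l.head? = some c := by
  rw [PySem.Chars.startswith_iff, pvSingleton_prefix_iff]

lemma pvEndswith_iff (l : List Char) (c : Char) :
    PySem.Chars.endswith l [c] = true ↔ l.getLast? = some c := by
  rw [PySem.Chars.endswith_iff, ← List.reverse_prefix]
  simp only [List.reverse_cons, List.reverse_nil, List.nil_append]
  rw [pvSingleton_prefix_iff, List.head?_reverse]

-- canonical description of validity, shared by both characterisations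
def pvOK (s : String) : Prop :=
  s.toList ≠ [] ∧ ¬ (100 : Int) < PySem.Chars.len s.toList ∧
  (∀ c ∈ pvInvalidChars, c ∉ s.toList) ∧
  s.toList.head? ≠ some '/' ∧ s.toList.getLast? ≠ some '/' ∧
  s.toList.head? ≠ some '.' ∧ s.toList.getLast? ≠ some '.' ∧
  ¬ ['.', '.'] <:+: s.toList ∧ ¬ ['/', '/'] <:+: s.toList

lemma pvA_iff (s : String) : is_valid_branch_name_py s = true ↔ pvOK s := by
  simp only [is_valid_branch_name_py, pvOK]
  split_ifs with h1 h2 h3 h4 h5 <;>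
    simp_all [List.any_eq_true, PySem.Chars.isIn_iff_infix, pvSingleton_infix_iff,
      pvStartswith_iff, pvEndswith_iff, not_or, List.head?_eq_getElem?] <;>
      first
        | tauto
        | (intro hne hle _ _ _ _ _ _
           rcases h1 with h | h
           · exact absurd h hne
           · exact absurd h (by omega))

lemma pvMemSwap (l : List Char) : (∀ c ∈ l, c ∉ pvBadChars) ↔ (∀ c ∈ pvInvalidChars, c ∉ l) := by
  have he : pvBadChars = pvInvalidChars := rfl
  rw [he]
  constructor <;> intro h c hc hcl <;> exact h _ hcl hc

lemma pvB_iff (s : String) : is_valid_branch_name_py_alt s = true ↔ pvOK s := by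
  simp only [is_valid_branch_name_py_alt, pvOK]
  split_ifs with h1 h2 <;>
    simp_all [pvScan_none, List.all_eq_true, pvNoAdj_true_iff, pvMemSwap, not_or,
      PySem.Chars.pyGet?_eq_listPyGet?, PySem.List.pyGet?_zero, PySem.List.pyGet?_neg_one,
      List.head?_eq_getElem?] <;>
      first
        | tauto
        | (intro hne hle _ _ _ _ _ _
           rcases h1 with h | h
           · exact absurd h hne
           · exact absurd h (by omega))

-- ===== VERDICT (by name: the statement is the Claim_ definition above) =====
theorem is_valid_branch_name_py_spec : Claim_equal_is_valid_branch_name_py := by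
  intro bn _
  unfold Spec_is_valid_branch_name_py
  have hA := pvA_iff bn
  have hB := pvB_iff bn
  cases h1 : is_valid_branch_name_py bn <;> cases h2 : is_valid_branch_name_py_alt bn <;>
    simp_all
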